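-- pv_equiv track=rewrite | github.com/JaishreeJaishankar/improved-chainsaw | enhanced_rule_optimization.py | group_destinations_by_ports
-- ===== SOURCE A (Python) =====
-- from typing import Dict, Any, List, Set, Tuple
--
-- def group_destinations_by_ports(dest_ports_map: Dict[str, Set[str]]) -> List[Dict[str, Set[str]]]:
--     """
--     Group destination IPs that have the same or similar port sets.
--
--     Args:
--         dest_ports_map: Mapping of destination IPs to sets of ports
--
--     Returns:
--         List of dictionaries mapping destination IPs to port sets
--     """
--     dest_ips = list(dest_ports_map.keys())
--
--     groups = []
--     assigned = set()
--
--     for dest_ip in dest_ips: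
--         if dest_ip in assigned:
--             continue
--
--         current_group = {dest_ip: dest_ports_map[dest_ip]}
--         assigned.add(dest_ip)
--
--         for other_ip in dest_ips:
--             if other_ip in assigned or other_ip == dest_ip:
--                 continue
--
--             if dest_ports_map[other_ip] == dest_ports_map[dest_ip]:
--                 current_group[other_ip] = dest_ports_map[other_ip]
--                 assigned.add(other_ip)
--
--         groups.append(current_group)
--
--     return groups
-- ===== SOURCE B (Python) =====
-- def group_destinations_by_ports(dest_ports_map):
--     """One-pass grouping: bucket each destination by its frozenset of ports."""
--     groups = {}
--     for ip, ports in dest_ports_map.items():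
--         groups.setdefault(frozenset(ports), {})[ip] = ports
--     return list(groups.values())
-- ===== Notes on version B (the rewrite author's own statement) =====
-- stated objective: faster
-- what changed: Replaces the quadratic outer/inner scan with assigned-set bookkeeping by a single pass that buckets each destination under its frozenset of ports in a dict, returning the bucket values.
import Mathlib
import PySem

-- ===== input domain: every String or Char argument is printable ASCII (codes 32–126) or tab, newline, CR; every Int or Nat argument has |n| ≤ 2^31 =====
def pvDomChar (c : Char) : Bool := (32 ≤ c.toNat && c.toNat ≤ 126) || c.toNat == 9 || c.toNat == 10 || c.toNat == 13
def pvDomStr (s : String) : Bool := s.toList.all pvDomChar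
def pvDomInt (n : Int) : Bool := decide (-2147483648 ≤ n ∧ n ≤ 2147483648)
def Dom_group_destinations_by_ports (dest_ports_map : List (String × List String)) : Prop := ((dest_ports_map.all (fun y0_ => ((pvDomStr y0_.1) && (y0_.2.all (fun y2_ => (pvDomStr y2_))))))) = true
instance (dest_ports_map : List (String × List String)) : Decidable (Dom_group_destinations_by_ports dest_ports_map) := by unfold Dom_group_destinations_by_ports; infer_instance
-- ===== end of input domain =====

-- B replaces A's quadratic outer/inner scan by a single pass bucketing each item
-- under its port set (Python: a dict keyed by frozenset); objective: faster.
-- Port-set values are Python sets, so they are compared with PySem.Set.equal.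

-- ===== PORT A =====
def group_destinations_by_ports (dest_ports_map : List (String × List String)) : List (List (String × List String)) :=
  let d : PySem.Dict String (List String) := PySem.Dict.mk dest_ports_map
  let dest_ips := d.keys
  let res := dest_ips.foldl
    (fun (st : List (PySem.Dict String (List String)) × PySem.Set String) dest_ip =>
      if PySem.Set.contains st.2 dest_ip then st
      else
        let cur : PySem.Dict String (List String) := PySem.Dict.empty.insert dest_ip (d.getD dest_ip [])
        let asg := PySem.Set.add st.2 dest_ip
        let inner := dest_ips.foldl
          (fun (p : PySem.Dict String (List String) × PySem.Set String) other_ip =>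
            if PySem.Set.contains p.2 other_ip || other_ip == dest_ip then p
            else if PySem.Set.equal (d.getD other_ip []) (d.getD dest_ip []) then
              (p.1.insert other_ip (d.getD other_ip []), PySem.Set.add p.2 other_ip)
            else p)
          (cur, asg)
        (st.1 ++ [inner.1], inner.2))
    ([], PySem.Set.empty)
  res.1.map PySem.Dict.items

-- ===== PORT B =====
-- B's dict is keyed by frozenset(ports): an association list looked up by SET equality
-- (PySem.Dict's key equality is list equality, which would be wrong here), updated in place.
def pvAddItem (acc : List (List String × List (String × List String))) (ip : String)
    (ports : List String) : List (List String × List (String × List String)) :=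
  match acc with
  | [] => [(ports, [(ip, ports)])]
  | (k, g) :: rest =>
    if PySem.Set.equal k ports then (k, g ++ [(ip, ports)]) :: rest
    else (k, g) :: pvAddItem rest ip ports

def group_destinations_by_ports_alt (dest_ports_map : List (String × List String)) :
    List (List (String × List String)) :=
  (dest_ports_map.foldl (fun acc p => pvAddItem acc p.1 p.2) []).map (fun e => e.2)

-- ===== PRECONDITION & SPEC =====
-- Pre_ excludes association lists with duplicate keys: they do not represent a Python
-- dict (A's parameter is a dict, whose keys are necessarily distinct).
def Pre_group_destinations_by_ports (dest_ports_map : List (String × List String)) : Prop :=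
  (dest_ports_map.map Prod.fst).Nodup
instance (dest_ports_map : List (String × List String)) : Decidable (Pre_group_destinations_by_ports dest_ports_map) := by unfold Pre_group_destinations_by_ports; infer_instance
def pvWitness_group_destinations_by_ports : (List (String × List String)) :=
  [("10.0.0.1", ["80", "443"]), ("10.0.0.2", ["443", "80"]), ("10.0.0.3", ["22"])]
def Spec_group_destinations_by_ports (dest_ports_map : List (String × List String)) (out : List (List (String × List String))) : Prop := out = group_destinations_by_ports_alt dest_ports_map
instance (dest_ports_map : List (String × List String)) (out : List (List (String × List String))) : Decidable (Spec_group_destinations_by_ports dest_ports_map out) := by unfold Spec_group_destinations_by_ports; infer_instance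

-- ===== CLAIM (what is proved, stated in full; the proofs are below) =====
def Claim_equal_group_destinations_by_ports : Prop := ∀ (dest_ports_map : List (String × List String)), Dom_group_destinations_by_ports dest_ports_map → Pre_group_destinations_by_ports dest_ports_map → Spec_group_destinations_by_ports dest_ports_map (group_destinations_by_ports dest_ports_map)

-- ===== LEMMAS AND PROOFS =====

-- Abbreviation for the Bool set-equality test both ports use.
def pvE (a b : List String) : Bool := PySem.Set.equal a b

theorem pvE_refl (a : List String) : pvE a a = true := by
  simp [pvE, PySem.Set.equal_iff]

theorem pvE_symm {a b : List String} (h : pvE a b = true) : pvE b a = true := by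
  simp only [pvE, PySem.Set.equal_iff] at *
  exact fun x => (h x).symm

theorem pvE_trans {a b c : List String} (h1 : pvE a b = true) (h2 : pvE b c = true) :
    pvE a c = true := by
  simp only [pvE, PySem.Set.equal_iff] at *
  exact fun x => (h1 x).trans (h2 x)

-- First-occurrence representatives of the equivalence classes of pvE.
def pvReps (l : List (List String)) : List (List String) :=
  l.foldl (fun acc s => if acc.any (fun k => pvE k s) then acc else acc ++ [s]) []

theorem pvReps_append_singleton (l : List (List String)) (s : List String) :
    pvReps (l ++ [s]) =
      if (pvReps l).any (fun k => pvE k s) then pvReps l else pvReps l ++ [s] := by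
  simp [pvReps, List.foldl_append]

theorem pvReps_complete (l : List (List String)) :
    ∀ s ∈ l, ∃ k ∈ pvReps l, pvE s k = true := by
  induction l using List.reverseRecOn with
  | nil => simp
  | append_singleton l s ih =>
    intro t ht
    rw [pvReps_append_singleton]
    rcases List.mem_append.1 ht with ht | ht
    · obtain ⟨k, hk, hek⟩ := ih t ht
      split
      · exact ⟨k, hk, hek⟩
      · exact ⟨k, List.mem_append_left _ hk, hek⟩
    · simp only [List.mem_singleton] at ht
      subst ht
      split
      · rename_i h
        obtain ⟨k, hk, hek⟩ := List.any_eq_true.1 h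
        exact ⟨k, hk, pvE_symm hek⟩
      · exact ⟨t, List.mem_append_right _ (List.mem_singleton.2 rfl), pvE_refl t⟩

theorem pvReps_pairwise (l : List (List String)) :
    (pvReps l).Pairwise (fun a b => ¬ pvE a b = true) := by
  induction l using List.reverseRecOn with
  | nil => simp [pvReps]
  | append_singleton l s ih =>
    rw [pvReps_append_singleton]
    split
    · exact ih
    · rename_i h
      rw [List.pairwise_append]
      refine ⟨ih, by simp, ?_⟩
      intro a ha b hb
      simp only [List.mem_singleton] at hb
      subst hb
      intro hE
      exact h (List.any_eq_true.2 ⟨a, ha, hE⟩)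

theorem pvReps_not_rel_of_not_any {l : List (List String)} {s : List String}
    (h : ¬ (pvReps l).any (fun k => pvE k s) = true) :
    ∀ t ∈ l, ¬ pvE t s = true := by
  intro t ht hts
  obtain ⟨k, hk, hek⟩ := pvReps_complete l t ht
  exact h (List.any_eq_true.2 ⟨k, hk, pvE_trans (pvE_symm hek) hts⟩)

-- The reference value both ports compute.
def pvRef (m : List (String × List String)) : List (List (String × List String)) :=
  (pvReps (m.map Prod.snd)).map (fun k => m.filter (fun q => pvE q.2 k))

-- ---------- B = pvRef ----------

theorem pvAddItem_of_not_any (ks : List (List String)) (f : List String → List (String × List String))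
    (ip : String) (ps : List String) (h : ∀ k ∈ ks, ¬ pvE k ps = true) :
    pvAddItem (ks.map (fun k => (k, f k))) ip ps =
      ks.map (fun k => (k, f k)) ++ [(ps, [(ip, ps)])] := by
  induction ks with
  | nil => simp [pvAddItem]
  | cons k ks ih =>
    simp only [List.map_cons, pvAddItem]
    rw [if_neg (by simpa [pvE] using h k (by simp))]
    simp [ih (fun k' hk' => h k' (by simp [hk']))]

theorem pvAddItem_of_any (ks : List (List String)) (f : List String → List (String × List String))
    (ip : String) (ps : List String)
    (hpw : ks.Pairwise (fun a b => ¬ pvE a b = true))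
    (hany : ks.any (fun k => pvE k ps) = true) :
    pvAddItem (ks.map (fun k => (k, f k))) ip ps =
      ks.map (fun k => (k, if pvE k ps then f k ++ [(ip, ps)] else f k)) := by
  induction ks with
  | nil => simp at hany
  | cons k ks ih =>
    rw [List.pairwise_cons] at hpw
    simp only [List.map_cons, pvAddItem]
    by_cases hk : pvE k ps = true
    · rw [if_pos (by simpa [pvE] using hk), if_pos hk]
      congr 1
      apply List.map_congr_left
      intro k' hk'
      rw [if_neg]
      intro hE
      exact hpw.1 k' hk' (pvE_trans hk (pvE_symm hE))
    · rw [if_neg (by simpa [pvE] using hk), if_neg hk]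
      have hany' : ks.any (fun k => pvE k ps) = true := by
        rcases List.any_eq_true.1 hany with ⟨k', hk', hE⟩
        rcases List.mem_cons.1 hk' with rfl | hk'
        · exact absurd hE hk
        · exact List.any_eq_true.2 ⟨k', hk', hE⟩
      simp [ih hpw.2 hany']

theorem pvB_acc (m : List (String × List String)) :
    m.foldl (fun acc p => pvAddItem acc p.1 p.2) [] =
      (pvReps (m.map Prod.snd)).map
        (fun k => (k, m.filter (fun q => pvE q.2 k))) := by
  induction m using List.reverseRecOn with
  | nil => simp [pvReps]
  | append_singleton m p ih =>
    have hsnd : (m ++ [p]).map Prod.snd = m.map Prod.snd ++ [p.2] := by simp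
    rw [List.foldl_append, List.foldl_cons, List.foldl_nil, ih, hsnd,
      pvReps_append_singleton]
    by_cases hany : (pvReps (m.map Prod.snd)).any (fun k => pvE k p.2) = true
    · rw [if_pos hany,
        pvAddItem_of_any _ _ _ _ (pvReps_pairwise _) hany]
      apply List.map_congr_left
      intro k hk
      rw [List.filter_append]
      by_cases hE : pvE k p.2 = true
      · have : pvE p.2 k = true := pvE_symm hE
        simp [hE, this]
      · have : ¬ pvE p.2 k = true := fun h => hE (pvE_symm h)
        simp [hE, this]
    · rw [if_neg hany,
        pvAddItem_of_not_any _ _ _ _ (fun k hk hE =>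
          hany (List.any_eq_true.2 ⟨k, hk, hE⟩))]
      rw [List.map_append]
      congr 1
      · apply List.map_congr_left
        intro k hk
        rw [List.filter_append]
        have hE : ¬ pvE k p.2 = true := fun h => hany (List.any_eq_true.2 ⟨k, hk, h⟩)
        have : ¬ pvE p.2 k = true := fun h => hE (pvE_symm h)
        simp [this]
      · have hnil : m.filter (fun q => pvE q.2 p.2) = [] := by
          rw [List.filter_eq_nil_iff]
          intro q hq
          exact fun h =>
            pvReps_not_rel_of_not_any hany q.2 (List.mem_map_of_mem hq) (by simpa using h)
        simp [List.filter_append, hnil, pvE_refl]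

theorem pvB_eq_ref (m : List (String × List String)) :
    group_destinations_by_ports_alt m = pvRef m := by
  rw [group_destinations_by_ports_alt, pvB_acc, pvRef, List.map_map]
  rfl

-- ---------- A = pvRef ----------

-- A's inner and outer loop bodies, with the dict lookups already resolved.
def pvInnerStep (ps : List String) (ip : String)
    (p : PySem.Dict String (List String) × PySem.Set String) (q : String × List String) :
    PySem.Dict String (List String) × PySem.Set String :=
  if PySem.Set.contains p.2 q.1 || q.1 == ip then p
  else if pvE q.2 ps then (p.1.insert q.1 q.2, PySem.Set.add p.2 q.1) else p

def pvOuterStep (m : List (String × List String))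
    (st : List (PySem.Dict String (List String)) × PySem.Set String)
    (q : String × List String) :
    List (PySem.Dict String (List String)) × PySem.Set String :=
  if PySem.Set.contains st.2 q.1 then st
  else
    let inner := m.foldl (pvInnerStep q.2 q.1)
      (PySem.Dict.empty.insert q.1 q.2, PySem.Set.add st.2 q.1)
    (st.1 ++ [inner.1], inner.2)

theorem pvA_clean (m : List (String × List String)) (hk : (m.map Prod.fst).Nodup) :
    group_destinations_by_ports m =
      ((m.foldl (pvOuterStep m) ([], PySem.Set.empty)).1).map PySem.Dict.items := by
  have hget : ∀ q ∈ m, (PySem.Dict.mk m).getD q.1 [] = q.2 := by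
    intro q hq
    exact PySem.Dict.getD_of_mem_items (PySem.Dict.mk m) (by simpa using hq) hk []
  simp only [group_destinations_by_ports]
  rw [show (PySem.Dict.mk m).keys = m.map Prod.fst from rfl, List.foldl_map]
  have hfold : ∀ (st : List (PySem.Dict String (List String)) × PySem.Set String)
      (q : String × List String), q ∈ m →
      (if PySem.Set.contains st.2 q.1 then st
       else
        (st.1 ++ [((m.map Prod.fst).foldl
            (fun p other_ip =>
              if PySem.Set.contains p.2 other_ip || other_ip == q.1 then p
              else if PySem.Set.equal ((PySem.Dict.mk m).getD other_ip [])
                  ((PySem.Dict.mk m).getD q.1 []) then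
                (p.1.insert other_ip ((PySem.Dict.mk m).getD other_ip []),
                 PySem.Set.add p.2 other_ip)
              else p)
            (PySem.Dict.empty.insert q.1 ((PySem.Dict.mk m).getD q.1 []),
             PySem.Set.add st.2 q.1)).1],
         ((m.map Prod.fst).foldl
            (fun p other_ip =>
              if PySem.Set.contains p.2 other_ip || other_ip == q.1 then p
              else if PySem.Set.equal ((PySem.Dict.mk m).getD other_ip [])
                  ((PySem.Dict.mk m).getD q.1 []) then
                (p.1.insert other_ip ((PySem.Dict.mk m).getD other_ip []),
                 PySem.Set.add p.2 other_ip)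
              else p)
            (PySem.Dict.empty.insert q.1 ((PySem.Dict.mk m).getD q.1 []),
             PySem.Set.add st.2 q.1)).2)) = pvOuterStep m st q := by
    intro st q hq
    have hinner : (m.map Prod.fst).foldl
        (fun p other_ip =>
          if PySem.Set.contains p.2 other_ip || other_ip == q.1 then p
          else if PySem.Set.equal ((PySem.Dict.mk m).getD other_ip [])
              ((PySem.Dict.mk m).getD q.1 []) then
            (p.1.insert other_ip ((PySem.Dict.mk m).getD other_ip []),
             PySem.Set.add p.2 other_ip)
          else p)
        (PySem.Dict.empty.insert q.1 ((PySem.Dict.mk m).getD q.1 []),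
         PySem.Set.add st.2 q.1) =
        m.foldl (pvInnerStep q.2 q.1)
          (PySem.Dict.empty.insert q.1 q.2, PySem.Set.add st.2 q.1) := by
      rw [hget q hq, List.foldl_map]
      apply PySem.List.foldl_congr_mem
      intro p q' hq'
      simp only [pvInnerStep, hget q' hq', pvE]
      rfl
    rw [hinner]

    rfl
  rw [PySem.List.foldl_congr_mem m _ (pvOuterStep m) _ hfold]

theorem pvContains_add_ne (s : PySem.Set String) (x y : String) (h : y ≠ x) :
    PySem.Set.contains (PySem.Set.add s x) y = PySem.Set.contains s y := by
  rcases Bool.eq_false_or_eq_true (PySem.Set.contains s y) with hb | hb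
  · rw [hb]
    exact (PySem.Set.contains_iff _ _).2
      ((PySem.Set.mem_add s x y).2 (Or.inl ((PySem.Set.contains_iff _ _).1 hb)))
  · rw [hb, Bool.eq_false_iff]
    intro hc
    rcases (PySem.Set.mem_add s x y).1 ((PySem.Set.contains_iff _ _).1 hc) with hm | rfl
    · exact Bool.eq_false_iff.1 hb ((PySem.Set.contains_iff _ _).2 hm)
    · exact h rfl

-- The items A's inner loop collects into the current group (besides the representative).
def pvP (ps : List String) (ip : String) (asg : PySem.Set String)
    (q : String × List String) : Bool :=
  !(PySem.Set.contains asg q.1) && !(q.1 == ip) && pvE q.2 ps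

theorem pvInner_spec (ps : List String) (ip : String) :
    ∀ (l : List (String × List String)), (l.map Prod.fst).Nodup →
    ∀ (cur : PySem.Dict String (List String)) (asg : PySem.Set String),
    l.foldl (pvInnerStep ps ip) (cur, asg) =
      ((l.filter (pvP ps ip asg)).foldl (fun c q => c.insert q.1 q.2) cur,
       PySem.Set.update asg ((l.filter (pvP ps ip asg)).map Prod.fst)) := by
  intro l
  induction l with
  | nil => intro _ cur asg; simp [PySem.Set.update]
  | cons q rest ih =>
    intro hnd cur asg
    have hnd2 : q.1 ∉ rest.map Prod.fst ∧ (rest.map Prod.fst).Nodup := by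
      rw [List.map_cons, List.nodup_cons] at hnd; exact hnd
    rw [List.foldl_cons]
    by_cases hc : (PySem.Set.contains asg q.1 || q.1 == ip) = true
    · have hstep : pvInnerStep ps ip (cur, asg) q = (cur, asg) := by
        simp only [pvInnerStep, if_pos hc]
      have hP : pvP ps ip asg q = false := by
        have hc' := hc
        simp only [Bool.or_eq_true] at hc'
        rcases hc' with h | h
        · unfold pvP; rw [h]; rfl
        · simp [pvP, h]
      rw [hstep, ih hnd2.2 cur asg, List.filter_cons, hP]
      simp only [Bool.false_eq_true, if_false]
    · have hc1 : PySem.Set.contains asg q.1 = false := by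
        rcases Bool.eq_false_or_eq_true (PySem.Set.contains asg q.1) with h | h
        · exact absurd (by rw [h]; rfl) hc
        · exact h
      have hc2 : (q.1 == ip) = false := by
        rcases Bool.eq_false_or_eq_true (q.1 == ip) with h | h
        · exact absurd (by simp [h]) hc
        · exact h
      have hfc : ∀ (s : PySem.Set String),
          rest.filter (pvP ps ip (PySem.Set.add s q.1)) = rest.filter (pvP ps ip s) := by
        intro s
        apply List.filter_congr
        intro q' hq'
        have hne : q'.1 ≠ q.1 := fun h => hnd2.1 (h ▸ List.mem_map_of_mem hq')
        simp only [pvP, pvContains_add_ne s q.1 q'.1 hne]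
      by_cases hE : pvE q.2 ps = true
      · have hstep : pvInnerStep ps ip (cur, asg) q =
            (cur.insert q.1 q.2, PySem.Set.add asg q.1) := by
          simp only [pvInnerStep, if_neg hc, if_pos hE]
        have hP : pvP ps ip asg q = true := by
          unfold pvP; rw [hc1, hc2, hE]; rfl
        rw [hstep, ih hnd2.2 (cur.insert q.1 q.2) (PySem.Set.add asg q.1), hfc asg,
          List.filter_cons, hP]
        simp only [if_true, List.foldl_cons, List.map_cons, PySem.Set.update_cons]
      · have hEf : pvE q.2 ps = false := Bool.eq_false_iff.2 hE
        have hstep : pvInnerStep ps ip (cur, asg) q = (cur, asg) := by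
          simp only [pvInnerStep, if_neg hc, hEf, Bool.false_eq_true, if_false]
        have hP : pvP ps ip asg q = false := by simp [pvP, hEf]
        rw [hstep, ih hnd2.2 cur asg, List.filter_cons, hP]
        simp only [Bool.false_eq_true, if_false]

theorem pvKeyInj (m : List (String × List String)) (hk : (m.map Prod.fst).Nodup) :
    ∀ q ∈ m, ∀ q' ∈ m, q.1 = q'.1 → q = q' :=
  fun _ hq _ hq' h => List.inj_on_of_nodup_map hk hq hq' h

theorem pvOuter_inv (m : List (String × List String)) (hk : (m.map Prod.fst).Nodup) :
    ∀ (pre suf : List (String × List String)), m = pre ++ suf →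
    ((pre.foldl (pvOuterStep m) ([], PySem.Set.empty)).1.map PySem.Dict.items =
       (pvReps (pre.map Prod.snd)).map (fun k => m.filter (fun q => pvE q.2 k)))
    ∧ (∀ x, x ∈ (pre.foldl (pvOuterStep m) ([], PySem.Set.empty)).2 ↔
        ∃ q ∈ m, q.1 = x ∧ ∃ k ∈ pvReps (pre.map Prod.snd), pvE q.2 k = true) := by
  intro pre
  induction pre using List.reverseRecOn with
  | nil =>
    intro suf hm
    constructor
    · simp [pvReps]
    · intro x
      constructor
      · intro hx; exact absurd hx (List.not_mem_nil)
      · rintro ⟨q, -, -, k, hk1, -⟩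
        simp [pvReps] at hk1
  | append_singleton pre q ih =>
    intro suf hm
    have hm' : m = pre ++ (q :: suf) := by rw [hm]; simp
    obtain ⟨hG, hA⟩ := ih (q :: suf) hm'
    have hqmem : q ∈ m := by
      rw [hm']; exact List.mem_append_right _ (List.mem_cons_self ..)
    have hsnd : (pre ++ [q]).map Prod.snd = pre.map Prod.snd ++ [q.2] := by simp
    rw [List.foldl_append, List.foldl_cons, List.foldl_nil]
    set st := pre.foldl (pvOuterStep m) ([], PySem.Set.empty) with hst
    by_cases hc : PySem.Set.contains st.2 q.1 = true
    · obtain ⟨q', hq'm, hq'1, k, hk1, hk2⟩ := (hA q.1).1 ((PySem.Set.contains_iff _ _).1 hc)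
      have hq'q : q' = q := pvKeyInj m hk q' hq'm q hqmem hq'1
      rw [hq'q] at hk2
      have hany : (pvReps (pre.map Prod.snd)).any (fun k => pvE k q.2) = true :=
        List.any_eq_true.2 ⟨k, hk1, pvE_symm hk2⟩
      have hrep : pvReps ((pre ++ [q]).map Prod.snd) = pvReps (pre.map Prod.snd) := by
        rw [hsnd, pvReps_append_singleton, if_pos hany]
      have hstep : pvOuterStep m st q = st := by
        unfold pvOuterStep
        split
        · rfl
        · rename_i hno; exact absurd hc hno
      rw [hstep, hrep]
      exact ⟨hG, hA⟩
    · have hnotany : ¬ (pvReps (pre.map Prod.snd)).any (fun k => pvE k q.2) = true := by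
        intro h
        obtain ⟨k, hk1, hk2⟩ := List.any_eq_true.1 h
        exact hc ((PySem.Set.contains_iff _ _).2
          ((hA q.1).2 ⟨q, hqmem, rfl, k, hk1, pvE_symm hk2⟩))
      have hrep : pvReps ((pre ++ [q]).map Prod.snd) =
          pvReps (pre.map Prod.snd) ++ [q.2] := by
        rw [hsnd, pvReps_append_singleton, if_neg hnotany]
      have hstep : pvOuterStep m st q =
          (st.1 ++ [(m.foldl (pvInnerStep q.2 q.1)
              (PySem.Dict.empty.insert q.1 q.2, PySem.Set.add st.2 q.1)).1],
           (m.foldl (pvInnerStep q.2 q.1)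
              (PySem.Dict.empty.insert q.1 q.2, PySem.Set.add st.2 q.1)).2) := by
        simp only [pvOuterStep, if_neg hc]
      rw [hstep, pvInner_spec q.2 q.1 m hk]
      -- items of the collected group
      have hfresh : ∀ a ∈ m.filter (pvP q.2 q.1 (PySem.Set.add st.2 q.1)),
          (PySem.Dict.empty.insert q.1 q.2).contains a.1 = false := by
        intro a ha
        have hPa := (List.mem_filter.1 ha).2
        simp only [pvP, Bool.and_eq_true, Bool.not_eq_true'] at hPa
        rw [PySem.Dict.contains_insert, hPa.1.2, PySem.Dict.contains_empty]
        rfl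
      have hfreshnd : ((m.filter (pvP q.2 q.1 (PySem.Set.add st.2 q.1))).map Prod.fst).Nodup :=
        List.Nodup.sublist (List.Sublist.map Prod.fst (List.filter_sublist)) hk
      have hitems : ((m.filter (pvP q.2 q.1 (PySem.Set.add st.2 q.1))).foldl
            (fun c q => c.insert q.1 q.2) (PySem.Dict.empty.insert q.1 q.2)).items =
          (q.1, q.2) :: m.filter (pvP q.2 q.1 (PySem.Set.add st.2 q.1)) := by
        rw [PySem.Dict.items_foldl_insert_fresh _ _ _ _ hfresh hfreshnd,
          show (PySem.Dict.empty.insert q.1 q.2).items = [(q.1, q.2)] from rfl]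
        simp
      -- pre elements lie in older classes
      have hpreE : ∀ q' ∈ pre, pvE q'.2 q.2 = false := fun q' h =>
        Bool.eq_false_iff.2 (pvReps_not_rel_of_not_any hnotany q'.2 (List.mem_map_of_mem h))
      have hq1suf : q.1 ∉ suf.map Prod.fst := by
        have h2 := hk
        rw [hm'] at h2
        simp only [List.map_append, List.map_cons] at h2
        exact (List.nodup_cons.1 (List.nodup_append.1 h2).2.1).1
      have hsufP : ∀ q' ∈ suf,
          pvP q.2 q.1 (PySem.Set.add st.2 q.1) q' = pvE q'.2 q.2 := by
        intro q' h
        have hne : q'.1 ≠ q.1 := fun e => hq1suf (e ▸ List.mem_map_of_mem h)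
        have hq'm : q' ∈ m := by
          rw [hm']; exact List.mem_append_right _ (List.mem_cons_of_mem _ h)
        by_cases hE : pvE q'.2 q.2 = true
        · have hnst : q'.1 ∉ st.2 := by
            intro hmem
            obtain ⟨q'', hq''m, hq''1, k, hk1, hk2⟩ := (hA q'.1).1 hmem
            have he : q'' = q' := pvKeyInj m hk q'' hq''m q' hq'm hq''1
            rw [he] at hk2
            exact hnotany (List.any_eq_true.2 ⟨k, hk1, pvE_trans (pvE_symm hk2) hE⟩)
          have hcontains : PySem.Set.contains (PySem.Set.add st.2 q.1) q'.1 = false := by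
            rw [pvContains_add_ne st.2 q.1 q'.1 hne]
            exact Bool.eq_false_iff.2 (fun hcc => hnst ((PySem.Set.contains_iff _ _).1 hcc))
          unfold pvP
          rw [hcontains, beq_eq_false_iff_ne.2 hne, hE]
          rfl
        · have hEf : pvE q'.2 q.2 = false := Bool.eq_false_iff.2 hE
          rw [hEf]; simp [pvP, hEf]
      have hfilter : (q.1, q.2) :: m.filter (pvP q.2 q.1 (PySem.Set.add st.2 q.1)) =
          m.filter (fun q' => pvE q'.2 q.2) := by
        conv_lhs => rw [hm']
        conv_rhs => rw [hm']
        rw [List.filter_append, List.filter_append, List.filter_cons, List.filter_cons]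
        have h1 : pre.filter (pvP q.2 q.1 (PySem.Set.add st.2 q.1)) = [] := by
          rw [List.filter_eq_nil_iff]
          intro a ha
          simp [pvP, hpreE a ha]
        have h2 : pre.filter (fun q' => pvE q'.2 q.2) = [] := by
          rw [List.filter_eq_nil_iff]
          intro a ha
          simp [hpreE a ha]
        have h3 : pvP q.2 q.1 (PySem.Set.add st.2 q.1) q = false := by
          simp [pvP]
        have h4 : pvE q.2 q.2 = true := pvE_refl q.2
        have h5 : suf.filter (pvP q.2 q.1 (PySem.Set.add st.2 q.1)) =
            suf.filter (fun q' => pvE q'.2 q.2) := List.filter_congr hsufP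
        rw [h1, h2, h3, h4, h5]
        simp
      constructor
      · rw [List.map_append, hG, hrep, List.map_append]
        congr 1
        rw [List.map_cons, List.map_nil, hitems, hfilter]
        rfl
      · intro x
        rw [hrep]
        constructor
        · intro hx
          rcases (PySem.Set.mem_update _ _ _).1 hx with hmem | hmap
          · rcases (PySem.Set.mem_add _ _ _).1 hmem with hold | rfl
            · obtain ⟨q', hq'm, hq'1, k, hk1, hk2⟩ := (hA x).1 hold
              exact ⟨q', hq'm, hq'1, k, List.mem_append_left _ hk1, hk2⟩
            · exact ⟨q, hqmem, rfl, q.2,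
                List.mem_append_right _ (List.mem_singleton.2 rfl), pvE_refl q.2⟩
          · obtain ⟨a, ha, ha1⟩ := List.mem_map.1 hmap
            have ham := List.mem_filter.1 ha
            have hPa := ham.2
            simp only [pvP, Bool.and_eq_true, Bool.not_eq_true'] at hPa
            exact ⟨a, ham.1, ha1, q.2,
              List.mem_append_right _ (List.mem_singleton.2 rfl), hPa.2⟩
        · rintro ⟨q', hq'm, rfl, k, hkmem, hkE⟩
          rcases List.mem_append.1 hkmem with hkold | hknew
          · exact (PySem.Set.mem_update _ _ _).2 (Or.inl
              ((PySem.Set.mem_add _ _ _).2 (Or.inl ((hA q'.1).2 ⟨q', hq'm, rfl, k, hkold, hkE⟩))))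
          · have hkq : k = q.2 := List.mem_singleton.1 hknew
            subst hkq
            have hq'm2 := hq'm
            rw [hm'] at hq'm2
            rcases List.mem_append.1 hq'm2 with hpre | hqs
            · exact absurd hkE (by simp [hpreE q' hpre])
            · rcases List.mem_cons.1 hqs with rfl | hsuf
              · exact (PySem.Set.mem_update _ _ _).2
                  (Or.inl ((PySem.Set.mem_add _ _ _).2 (Or.inr rfl)))
              · have hPq' : pvP q.2 q.1 (PySem.Set.add st.2 q.1) q' = true := by
                  rw [hsufP q' hsuf, hkE]
                refine (PySem.Set.mem_update _ _ _).2 (Or.inr ?_)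
                exact List.mem_map.2 ⟨q', List.mem_filter.2 ⟨hq'm, hPq'⟩, rfl⟩

theorem pvA_eq_ref (m : List (String × List String))
    (hk : (m.map Prod.fst).Nodup) :
    group_destinations_by_ports m = pvRef m := by
  rw [pvA_clean m hk]
  exact (pvOuter_inv m hk m [] (by simp)).1

-- ===== VERDICT (by name: the statement is the Claim_ definition above) =====
theorem group_destinations_by_ports_spec : Claim_equal_group_destinations_by_ports := by
  intro m _ hpre
  unfold Spec_group_destinations_by_ports
  rw [pvA_eq_ref m hpre, pvB_eq_ref]
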